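-- pv_equiv track=rewrite | github.com/lrx0014/break_enigma | src/batons.py | no_contradiction
-- ===== SOURCE A (Python) =====
-- def no_contradiction(A, B):
--     if len(A) != len(B):
--         return False
--
--     mapping = {}
--
--     for a, b in zip(A, B):
--         if a in mapping and mapping[a] != b:
--             return False
--         if b in mapping and mapping[b] != a:
--             return False
--
--         mapping[a] = b
--         mapping[b] = a
--
--     return True
-- ===== SOURCE B (Python) =====
-- def no_contradiction(A, B):
--     if len(A) != len(B):
--         return False
--     cons = []
--     for a, b in zip(A, B):
--         cons += [(a, b), (b, a)]
--     return all(y1 == y2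
--                for (x1, y1) in cons
--                for (x2, y2) in cons
--                if x1 == x2)
-- ===== Notes on version B (the rewrite author's own statement) =====
-- stated objective: alternative
-- what changed: B drops the dictionary entirely: it materialises the symmetric constraint list [(a,b),(b,a) for each pair] and decides consistency by a quadratic all-pairs check (any two constraints on the same character must agree), instead of A's single pass that commits one value per character in a dict and early-returns on conflict.
import Mathlib
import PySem

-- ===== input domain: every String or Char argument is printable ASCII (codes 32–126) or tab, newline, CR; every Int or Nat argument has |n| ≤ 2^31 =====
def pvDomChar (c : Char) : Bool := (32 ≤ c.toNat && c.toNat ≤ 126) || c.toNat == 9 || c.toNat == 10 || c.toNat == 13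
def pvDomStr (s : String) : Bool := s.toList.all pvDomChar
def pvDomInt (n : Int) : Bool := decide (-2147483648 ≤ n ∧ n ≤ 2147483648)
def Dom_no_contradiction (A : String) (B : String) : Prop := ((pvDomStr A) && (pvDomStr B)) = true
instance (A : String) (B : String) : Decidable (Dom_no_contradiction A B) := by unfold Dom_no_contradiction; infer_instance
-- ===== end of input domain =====

-- B drops A's committed dict: it builds the symmetric constraint list and decides consistency
-- by a quadratic all-pairs agreement check (alternative algorithm, no dict; quadratic rather than linear, no speed claimed).


-- ===== PORT A =====
-- the for-loop over zip(A, B) with its two early returns, state = the single committed mapping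
def noContraGo (m : PySem.Dict Char Char) : List (Char × Char) → Bool
  | [] => true
  | (a, b) :: rest =>
    if (m.get? a).any (fun c => c != b) then false
    else if (m.get? b).any (fun c => c != a) then false
    else noContraGo ((m.insert a b).insert b a) rest

def no_contradiction (A : String) (B : String) : Bool :=
  if PySem.Str.len A ≠ PySem.Str.len B then false
  else noContraGo PySem.Dict.empty (A.toList.zip B.toList)

-- ===== PORT B =====
def no_contradiction_alt (A : String) (B : String) : Bool :=
  if PySem.Str.len A ≠ PySem.Str.len B then false
  else
    -- cons += [(a, b), (b, a)] for each zipped pair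
    let cons := (A.toList.zip B.toList).foldl
      (fun acc p => acc ++ [(p.1, p.2), (p.2, p.1)]) []
    -- all(y1 == y2 for (x1, y1) in cons for (x2, y2) in cons if x1 == x2)
    cons.all (fun p => cons.all (fun q => !(p.1 == q.1) || p.2 == q.2))

-- ===== PRECONDITION & SPEC =====
def Spec_no_contradiction (A : String) (B : String) (out : Bool) : Prop := out = no_contradiction_alt A B
instance (A : String) (B : String) (out : Bool) : Decidable (Spec_no_contradiction A B out) := by unfold Spec_no_contradiction; infer_instance

-- ===== CLAIM (what is proved, stated in full; the proofs are below) =====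
def Claim_equal_no_contradiction : Prop := ∀ (A : String) (B : String), Dom_no_contradiction A B → Spec_no_contradiction A B (no_contradiction A B)

-- ===== LEMMAS AND PROOFS =====

-- the symmetric constraint list B builds
def consOf (ps : List (Char × Char)) : List (Char × Char) :=
  ps.flatMap (fun p => [(p.1, p.2), (p.2, p.1)])

-- functional consistency of a constraint list
def ConsP (L : List (Char × Char)) : Prop :=
  ∀ p ∈ L, ∀ q ∈ L, p.1 = q.1 → p.2 = q.2

-- a single constraint is compatible with the committed mapping
def Compat (m : PySem.Dict Char Char) (p : Char × Char) : Prop :=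
  m.get? p.1 = none ∨ m.get? p.1 = some p.2

lemma get?_double_insert (m : PySem.Dict Char Char) (a b k : Char) :
    ((m.insert a b).insert b a).get? k =
      if k = b then some a else if k = a then some b else m.get? k := by
  rw [PySem.Dict.get?_insert]
  by_cases hb : k = b
  · simp [hb]
  · rw [if_neg hb, if_neg hb, PySem.Dict.get?_insert]

-- A's loop returns true iff every remaining constraint is compatible with the
-- committed mapping and the remaining constraints are mutually consistent
lemma go_iff (ps : List (Char × Char)) (m : PySem.Dict Char Char) :
    noContraGo m ps = true ↔ ((∀ p ∈ consOf ps, Compat m p) ∧ ConsP (consOf ps)) := by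
  induction ps generalizing m with
  | nil => simp [noContraGo, consOf, ConsP]
  | cons hd rest ih =>
    obtain ⟨a, b⟩ := hd
    have hcons : consOf ((a, b) :: rest) = (a, b) :: (b, a) :: consOf rest := rfl
    rw [noContraGo, hcons]
    set m' := (m.insert a b).insert b a with hm'
    have hga : m'.get? a = some b := by
      rw [hm', get?_double_insert]
      by_cases h : a = b <;> simp [h]
    have hgb : m'.get? b = some a := by
      rw [hm', get?_double_insert]; simp
    by_cases hfa : (m.get? a).any (fun c => c != b) = true
    · rw [if_pos hfa]
      refine iff_of_false (by simp) ?_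
      rintro ⟨hcomp, -⟩
      cases hma : m.get? a with
      | none => rw [hma] at hfa; simp at hfa
      | some c =>
        rw [hma] at hfa
        simp only [Option.any_some, bne_iff_ne, ne_eq] at hfa
        have := hcomp (a, b) (by simp)
        unfold Compat at this
        simp only [hma, reduceCtorEq, Option.some.injEq, false_or] at this
        exact hfa this
    · rw [if_neg hfa]
      have hka : Compat m (a, b) := by
        unfold Compat
        cases hma : m.get? a with
        | none => exact Or.inl rfl
        | some c =>
          rw [hma] at hfa
          simp only [Option.any_some, bne_iff_ne, ne_eq, not_not] at hfa
          exact Or.inr (by rw [hfa])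
      by_cases hfb : (m.get? b).any (fun c => c != a) = true
      · rw [if_pos hfb]
        refine iff_of_false (by simp) ?_
        rintro ⟨hcomp, -⟩
        cases hmb : m.get? b with
        | none => rw [hmb] at hfb; simp at hfb
        | some c =>
          rw [hmb] at hfb
          simp only [Option.any_some, bne_iff_ne, ne_eq] at hfb
          have := hcomp (b, a) (by simp)
          unfold Compat at this
          simp only [hmb, reduceCtorEq, Option.some.injEq, false_or] at this
          exact hfb this
      · rw [if_neg hfb]
        have hkb : Compat m (b, a) := by
          unfold Compat
          cases hmb : m.get? b with
          | none => exact Or.inl rfl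
          | some c =>
            rw [hmb] at hfb
            simp only [Option.any_some, bne_iff_ne, ne_eq, not_not] at hfb
            exact Or.inr (by rw [hfb])
        rw [ih m']
        constructor
        · rintro ⟨hcomp', hcons'⟩
          -- lookups in m' pin every shared first component to b / a
          have pin : ∀ p ∈ consOf rest, (p.1 = a → p.2 = b) ∧ (p.1 = b → p.2 = a) := by
            intro p hp
            have := hcomp' p hp
            unfold Compat at this
            constructor
            · intro h1
              rcases this with h | h <;> rw [h1, hga] at h
              · cases h
              · exact (Option.some.inj h).symm
            · intro h1
              rcases this with h | h <;> rw [h1, hgb] at h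
              · cases h
              · exact (Option.some.inj h).symm
          refine ⟨?_, ?_⟩
          · -- every constraint compatible with m
            intro p hp'
            rw [List.mem_cons, List.mem_cons] at hp'
            rcases hp' with rfl | rfl | hp
            · exact hka
            · exact hkb
            · by_cases h1 : p.1 = b
              · unfold Compat
                rw [h1, (pin p hp).2 h1]
                exact hkb
              · by_cases h2 : p.1 = a
                · unfold Compat
                  rw [h2, (pin p hp).1 h2]
                  exact hka
                · have := hcomp' p hp
                  unfold Compat at this ⊢
                  rw [hm', get?_double_insert, if_neg h1, if_neg h2] at this
                  exact this
          · -- mutual consistency of the full list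
            intro p hp' q hq' heq
            rw [List.mem_cons, List.mem_cons] at hp' hq'
            rcases hp' with rfl | rfl | hp <;> rcases hq' with rfl | rfl | hq
            · rfl
            · simp only at heq; rw [heq]
            · exact ((pin q hq).1 heq.symm).symm
            · simp only at heq; rw [heq]
            · rfl
            · exact ((pin q hq).2 heq.symm).symm
            · exact (pin p hp).1 heq
            · exact (pin p hp).2 heq
            · exact hcons' p hp q hq heq
        · rintro ⟨hcomp, hcons⟩
          have pin : ∀ p ∈ consOf rest, (p.1 = a → p.2 = b) ∧ (p.1 = b → p.2 = a) := by
            intro p hp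
            refine ⟨fun h1 => hcons p (by simp [hp]) (a, b) (by simp) h1,
                    fun h1 => hcons p (by simp [hp]) (b, a) (by simp) h1⟩
          refine ⟨?_, ?_⟩
          · intro p hp
            unfold Compat
            rw [hm', get?_double_insert]
            by_cases h1 : p.1 = b
            · rw [if_pos h1]
              right
              rw [(pin p hp).2 h1]
            · rw [if_neg h1]
              by_cases h2 : p.1 = a
              · rw [if_pos h2]
                right
                rw [(pin p hp).1 h2]
              · rw [if_neg h2]
                exact hcomp p (by simp [hp])
          · intro p hp q hq heq
            exact hcons p (by simp [hp]) q (by simp [hq]) heq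

-- B's nested all is exactly ConsP
lemma all_iff_consP (L : List (Char × Char)) :
    (L.all (fun p => L.all (fun q => !(p.1 == q.1) || p.2 == q.2)) = true) ↔ ConsP L := by
  unfold ConsP
  simp only [List.all_eq_true, Bool.or_eq_true, Bool.not_eq_eq_eq_not, Bool.not_true,
    beq_eq_false_iff_ne, ne_eq, beq_iff_eq]
  constructor
  · intro h p hp q hq heq
    rcases h p hp q hq with h' | h'
    · exact absurd heq h'
    · exact h'
  · intro h p hp q hq
    by_cases heq : p.1 = q.1
    · exact Or.inr (h p hp q hq heq)
    · exact Or.inl heq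

-- ===== VERDICT (by name: the statement is the Claim_ definition above) =====
theorem no_contradiction_spec : Claim_equal_no_contradiction := by
  intro A B _
  unfold Spec_no_contradiction no_contradiction no_contradiction_alt
  by_cases hlen : PySem.Str.len A ≠ PySem.Str.len B
  · rw [if_pos hlen, if_pos hlen]
  · rw [if_neg hlen, if_neg hlen]
    simp only [PySem.List.foldl_append_eq_flatMap, List.nil_append]
    rw [Bool.eq_iff_iff, go_iff, all_iff_consP]
    constructor
    · rintro ⟨_, h⟩; exact h
    · intro h
      refine ⟨fun p _ => Or.inl (PySem.Dict.get?_empty p.1), h⟩
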